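-- pv_equiv track=rewrite | github.com/xianzeYao/TJUDRLLAB-ARX_LIFT2s | Demo/vis4point.py | _build_single_prompts
-- ===== SOURCE A (Python) =====
-- from typing import List, Optional, Tuple
--
-- COASTER_PROMPTS = [
--     "the center of coaster (the left one near cups most)",
--     "the center of coaster (the right one near cups most)",
--     "the center of coaster (the leftmost one)",
--     "the coaster (the rightmost one)",
-- ]
--
-- def _build_single_prompts(
--     step_cups: List[str],
--     no_last_place: bool,
-- ) -> List[str]:
--     if not step_cups:
--         raise ValueError("step_cups 不能为空")
--     if len(step_cups) > len(COASTER_PROMPTS):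
--         raise ValueError(
--             f"step_cups 数量不能超过 {len(COASTER_PROMPTS)}，当前为 {len(step_cups)}")
--
--     prompts: List[str] = []
--     for i, step in enumerate(step_cups):
--         prompts.append(step)
--         if not (no_last_place and i == len(step_cups) - 1):
--             prompts.append(COASTER_PROMPTS[i])
--     return prompts
-- ===== SOURCE B (Python) =====
-- from typing import List
--
-- COASTER_PROMPTS = [
--     "the center of coaster (the left one near cups most)",
--     "the center of coaster (the right one near cups most)",
--     "the center of coaster (the leftmost one)",
--     "the coaster (the rightmost one)",
-- ]
--
-- def _build_single_prompts(
--     step_cups: List[str],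
--     no_last_place: bool,
-- ) -> List[str]:
--     if not step_cups:
--         raise ValueError("step_cups 不能为空")
--     if len(step_cups) > len(COASTER_PROMPTS):
--         raise ValueError(
--             f"step_cups 数量不能超过 {len(COASTER_PROMPTS)}，当前为 {len(step_cups)}")
--
--     def go(steps: List[str], coasters: List[str]) -> List[str]:
--         # structural recursion: the last step is the base case, where no_last_place
--         # decides whether its coaster is emitted; no index arithmetic anywhere
--         if len(steps) == 1:
--             return [steps[0]] if no_last_place else [steps[0], coasters[0]]
--         return [steps[0], coasters[0]] + go(steps[1:], coasters[1:])
--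
--     return go(step_cups, COASTER_PROMPTS)
-- ===== Notes on version B (the rewrite author's own statement) =====
-- stated objective: alternative
-- what changed: Replaces A's indexed loop with an accumulator and a per-iteration last-index suppression test by a structural recursion over the two lists in lockstep, whose single-element base case decides whether the final coaster is emitted; no indices, no accumulator, no trimming.
import Mathlib
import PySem

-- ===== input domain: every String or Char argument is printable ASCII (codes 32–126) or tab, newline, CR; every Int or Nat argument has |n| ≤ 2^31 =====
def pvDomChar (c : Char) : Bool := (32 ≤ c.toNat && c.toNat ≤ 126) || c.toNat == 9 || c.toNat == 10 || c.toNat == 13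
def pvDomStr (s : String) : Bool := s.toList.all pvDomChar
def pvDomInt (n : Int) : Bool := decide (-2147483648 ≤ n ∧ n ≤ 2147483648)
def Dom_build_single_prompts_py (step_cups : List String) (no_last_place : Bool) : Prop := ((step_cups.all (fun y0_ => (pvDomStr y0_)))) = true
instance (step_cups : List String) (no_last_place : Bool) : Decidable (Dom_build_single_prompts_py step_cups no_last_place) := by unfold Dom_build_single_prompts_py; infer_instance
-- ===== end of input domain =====

-- B replaces A's indexed loop with last-index suppression test by a structural recursion over
-- step_cups and the coaster list in lockstep, deciding the final coaster at the base case (objective: alternative).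

def coasterPrompts : List String := [
  "the center of coaster (the left one near cups most)",
  "the center of coaster (the right one near cups most)",
  "the center of coaster (the leftmost one)",
  "the coaster (the rightmost one)"]

-- ===== PORT A =====
def build_single_prompts_py (step_cups : List String) (no_last_place : Bool) : List String :=
  (PySem.List.enumerate step_cups).foldl
    (fun prompts p =>
      let prompts := prompts ++ [p.2]
      if ¬ (no_last_place = true ∧ p.1 = (step_cups.length : Int) - 1) then
        prompts ++ [(PySem.List.pyGet? coasterPrompts p.1).getD ""]   -- index always in range under Pre_
      else prompts) []

-- ===== PORT B =====
-- Source B's inner recursive go(steps, coasters); coasters[0] is in range under Pre_ (getD "" never fires there)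
def goB (no_last_place : Bool) : List String → List String → List String
  | [], _ => []          -- unreachable: go is never called with empty steps under Pre_
  | [s], cs => if no_last_place then [s] else [s, cs.headD ""]
  | s :: rest, cs => [s, cs.headD ""] ++ goB no_last_place rest cs.tail

def build_single_prompts_py_alt (step_cups : List String) (no_last_place : Bool) : List String :=
  goB no_last_place step_cups coasterPrompts

-- ===== PRECONDITION & SPEC =====
-- A raises ValueError when step_cups is empty or longer than the 4 coaster prompts; those inputs are excluded.
def Pre_build_single_prompts_py (step_cups : List String) (no_last_place : Bool) : Prop :=
  step_cups ≠ [] ∧ step_cups.length ≤ 4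
instance (step_cups : List String) (no_last_place : Bool) : Decidable (Pre_build_single_prompts_py step_cups no_last_place) := by unfold Pre_build_single_prompts_py; infer_instance
def pvWitness_build_single_prompts_py : List String × Bool := (["cup1", "cup2"], true)

def Spec_build_single_prompts_py (step_cups : List String) (no_last_place : Bool) (out : List String) : Prop := out = build_single_prompts_py_alt step_cups no_last_place
instance (step_cups : List String) (no_last_place : Bool) (out : List String) : Decidable (Spec_build_single_prompts_py step_cups no_last_place out) := by unfold Spec_build_single_prompts_py; infer_instance

-- ===== CLAIM =====
def Claim_equal_build_single_prompts_py : Prop := ∀ (step_cups : List String) (no_last_place : Bool), Dom_build_single_prompts_py step_cups no_last_place → Pre_build_single_prompts_py step_cups no_last_place → Spec_build_single_prompts_py step_cups no_last_place (build_single_prompts_py step_cups no_last_place)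

-- ===== LEMMAS AND PROOFS =====

-- ===== VERDICT =====
theorem build_single_prompts_py_spec : Claim_equal_build_single_prompts_py := by
  intro step_cups no_last_place _ hpre
  obtain ⟨hne, hlen⟩ := hpre
  unfold Spec_build_single_prompts_py
  rcases step_cups with _ | ⟨a, _ | ⟨b, _ | ⟨c, _ | ⟨d, rest⟩⟩⟩⟩
  · exact absurd rfl hne
  · cases no_last_place <;>
      simp [build_single_prompts_py, build_single_prompts_py_alt, goB, coasterPrompts,
        PySem.List.enumerate, PySem.List.pyGet?, PySem.List.pyIdx?, List.foldl]
  · cases no_last_place <;>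
      simp [build_single_prompts_py, build_single_prompts_py_alt, goB, coasterPrompts,
        PySem.List.enumerate, PySem.List.pyGet?, PySem.List.pyIdx?, List.foldl]
  · cases no_last_place <;>
      simp [build_single_prompts_py, build_single_prompts_py_alt, goB, coasterPrompts,
        PySem.List.enumerate, PySem.List.pyGet?, PySem.List.pyIdx?, List.foldl]
  · rcases rest with _ | ⟨e, rest⟩
    swap
    · simp at hlen; omega
    cases no_last_place <;>
      simp [build_single_prompts_py, build_single_prompts_py_alt, goB, coasterPrompts,
        PySem.List.enumerate, PySem.List.pyGet?, PySem.List.pyIdx?, List.foldl]
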